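-- pv_equiv track=rewrite | github.com/voici5986/Memory-Palace | scripts/install_skill.py | _strip_codex_memory_palace_block
-- ===== SOURCE A (Python) =====
-- def _strip_codex_memory_palace_block(text: str) -> str:
--     lines = text.splitlines()
--     kept: list[str] = []
--     skipping = False
--     for line in lines:
--         stripped = line.strip()
--         if stripped.startswith("[mcp_servers.memory-palace"):
--             skipping = True
--             continue
--         if skipping and stripped.startswith("[") and not stripped.startswith("[mcp_servers.memory-palace"):
--             skipping = False
--         if not skipping:
--             kept.append(line)
--     return "\n".join(kept).rstrip()
-- ===== SOURCE B (Python) =====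
-- def _strip_codex_memory_palace_block(text: str) -> str:
--     # Build groups: a preamble group, then one group per section-header line
--     # (header = stripped line starting with '['), each holding its header and
--     # following body lines; keep every group whose header is not the target.
--     groups = []
--     cur = []
--     for line in text.splitlines():
--         if line.strip().startswith("["):
--             groups.append(cur)
--             cur = [line]
--         else:
--             cur.append(line)
--     groups.append(cur)
--     kept = []
--     for g in groups:
--         if not (g and g[0].strip().startswith("[mcp_servers.memory-palace")):
--             kept.extend(g)
--     return "\n".join(kept).rstrip()
-- ===== Notes on version B (the rewrite author's own statement) =====
-- stated objective: alternative
-- what changed: Replaces the running skip-flag line filter with a build-blocks-then-filter decomposition: lines are first grouped into a preamble plus one group per '['-section header, then whole groups whose header is the memory-palace section are dropped and the rest flattened and joined.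
import Mathlib
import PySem

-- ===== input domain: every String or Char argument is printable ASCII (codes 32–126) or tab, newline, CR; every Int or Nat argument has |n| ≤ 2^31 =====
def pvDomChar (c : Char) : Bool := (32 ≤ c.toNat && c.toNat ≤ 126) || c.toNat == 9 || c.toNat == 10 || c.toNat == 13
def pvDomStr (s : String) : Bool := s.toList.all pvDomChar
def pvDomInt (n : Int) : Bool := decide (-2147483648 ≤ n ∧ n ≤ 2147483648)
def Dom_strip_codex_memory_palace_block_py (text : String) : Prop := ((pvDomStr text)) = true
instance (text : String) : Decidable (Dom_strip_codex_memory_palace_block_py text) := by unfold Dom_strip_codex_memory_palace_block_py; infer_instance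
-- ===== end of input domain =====

-- B replaces A's running skip-flag line filter by a build-header-groups-then-filter
-- decomposition (objective: alternative; same cost).

def pvTarget : String := "[mcp_servers.memory-palace"

-- ===== PORT A =====
def strip_codex_memory_palace_block_py (text : String) : String :=
  let lines := PySem.Str.splitlines text
  let r := lines.foldl (fun (st : List String × Bool) line =>
    let kept := st.1
    let skipping := st.2
    let stripped := PySem.Str.strip line
    if PySem.Str.startswith stripped pvTarget then (kept, true)
    else
      let skipping :=
        if skipping && PySem.Str.startswith stripped "[" &&
            !(PySem.Str.startswith stripped pvTarget) then false else skipping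
      if !skipping then (kept ++ [line], skipping) else (kept, skipping)) ([], false)
  PySem.Str.rstrip (PySem.Str.join "\n" r.1)

-- ===== PORT B =====
-- builds the group list: preamble group, then one group per '['-header line
def pvGroups : List String → List String → List (List String)
  | [], cur => [cur]
  | l :: ls, cur =>
    if PySem.Str.startswith (PySem.Str.strip l) "[" then cur :: pvGroups ls [l]
    else pvGroups ls (cur ++ [l])

def pvKeepGroup (g : List String) : Bool :=
  match g with
  | [] => true
  | h :: _ => !(PySem.Str.startswith (PySem.Str.strip h) pvTarget)

def strip_codex_memory_palace_block_py_alt (text : String) : String :=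
  let groups := pvGroups (PySem.Str.splitlines text) []
  let kept := (groups.filter pvKeepGroup).flatten
  PySem.Str.rstrip (PySem.Str.join "\n" kept)

-- ===== PRECONDITION & SPEC =====
def Spec_strip_codex_memory_palace_block_py (text : String) (out : String) : Prop := out = strip_codex_memory_palace_block_py_alt text
instance (text : String) (out : String) : Decidable (Spec_strip_codex_memory_palace_block_py text out) := by unfold Spec_strip_codex_memory_palace_block_py; infer_instance

-- ===== CLAIM (what is proved, stated in full; the proofs are below) =====
def Claim_equal_strip_codex_memory_palace_block_py : Prop := ∀ (text : String), Dom_strip_codex_memory_palace_block_py text → Spec_strip_codex_memory_palace_block_py text (strip_codex_memory_palace_block_py text)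

-- ===== LEMMAS AND PROOFS =====

-- proof-only helpers
def pvIsTarget (l : String) : Bool := PySem.Str.startswith (PySem.Str.strip l) pvTarget
def pvIsHeader (l : String) : Bool := PySem.Str.startswith (PySem.Str.strip l) "["

-- the common kept-lines function both ports compute
def pvKept : List String → Bool → List String
  | [], _ => []
  | l :: ls, s =>
    if pvIsTarget l then pvKept ls true
    else if s && pvIsHeader l then l :: pvKept ls false
    else if s then pvKept ls s
    else l :: pvKept ls s

lemma pvTarget_header (l : String) (h : pvIsTarget l = true) : pvIsHeader l = true := by
  simp only [pvIsTarget, pvIsHeader, PySem.Str.startswith_eq] at *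
  rw [PySem.Chars.startswith_iff] at *
  exact List.IsPrefix.trans (by decide) h

def pvStep (st : List String × Bool) (line : String) : List String × Bool :=
  let kept := st.1
  let skipping := st.2
  let stripped := PySem.Str.strip line
  if PySem.Str.startswith stripped pvTarget then (kept, true)
  else
    let skipping :=
      if skipping && PySem.Str.startswith stripped "[" &&
          !(PySem.Str.startswith stripped pvTarget) then false else skipping
    if !skipping then (kept ++ [line], skipping) else (kept, skipping)

lemma pvStep_target (kept : List String) (s : Bool) (l : String)
    (h : pvIsTarget l = true) : pvStep (kept, s) l = (kept, true) := by
  unfold pvIsTarget at h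
  simp only [pvStep, h, if_pos]

lemma pvStep_header (kept : List String) (s : Bool) (l : String)
    (h : pvIsTarget l = false) (hh : pvIsHeader l = true) :
    pvStep (kept, s) l = (kept ++ [l], false) := by
  unfold pvIsTarget at h; unfold pvIsHeader at hh
  simp at h hh
  cases s <;> simp [pvStep, h, hh]

lemma pvStep_plain (kept : List String) (s : Bool) (l : String)
    (h : pvIsTarget l = false) (hh : pvIsHeader l = false) :
    pvStep (kept, s) l = (if s then kept else kept ++ [l], s) := by
  unfold pvIsTarget at h; unfold pvIsHeader at hh
  simp at h hh
  cases s <;> simp [pvStep, h, hh]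

lemma pvKept_cons (l : String) (ls : List String) (s : Bool) :
    pvKept (l :: ls) s =
      if pvIsTarget l then pvKept ls true
      else if s && pvIsHeader l then l :: pvKept ls false
      else if s then pvKept ls s
      else l :: pvKept ls s := rfl

lemma pvFoldA (ls : List String) : ∀ (kept : List String) (s : Bool),
    (ls.foldl pvStep (kept, s)).1 = kept ++ pvKept ls s := by
  induction ls with
  | nil => intro kept s; simp [pvKept]
  | cons l ls ih =>
    intro kept s
    rw [List.foldl_cons, pvKept_cons]
    cases ht : pvIsTarget l with
    | true => rw [pvStep_target kept s l ht, ih, if_pos rfl]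
    | false =>
      cases hh : pvIsHeader l with
      | true =>
        rw [pvStep_header kept s l ht hh, ih]
        cases s <;> simp [ht, hh]
      | false =>
        rw [pvStep_plain kept s l ht hh]
        cases s <;> simp [ht, hh, ih]

lemma pvGroups_cons_header (l : String) (ls cur : List String)
    (hh : pvIsHeader l = true) : pvGroups (l :: ls) cur = cur :: pvGroups ls [l] := by
  unfold pvIsHeader at hh
  simp only [pvGroups, hh, if_pos]

lemma pvGroups_cons_body (l : String) (ls cur : List String)
    (hh : pvIsHeader l = false) : pvGroups (l :: ls) cur = pvGroups ls (cur ++ [l]) := by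
  unfold pvIsHeader at hh
  simp only [pvGroups, hh, Bool.false_eq_true, if_false]

lemma pvKeepGroup_cons (h : String) (t : List String) :
    pvKeepGroup (h :: t) = !pvIsTarget h := rfl

def pvFlag (cur : List String) : Bool :=
  match cur with
  | [] => false
  | h :: _ => pvIsTarget h

lemma pvFoldB (ls : List String) : ∀ (cur : List String),
    ((pvGroups ls cur).filter pvKeepGroup).flatten
      = (if pvKeepGroup cur then cur else []) ++ pvKept ls (pvFlag cur) := by
  induction ls with
  | nil =>
    intro cur
    simp only [pvGroups, pvKept, List.filter]
    cases pvKeepGroup cur <;> simp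
  | cons l ls ih =>
    intro cur
    rw [pvKept_cons]
    cases hh : pvIsHeader l with
    | true =>
      rw [pvGroups_cons_header l ls cur hh, List.filter_cons]
      cases ht : pvIsTarget l with
      | true =>
        have hk : pvKeepGroup [l] = false := by rw [pvKeepGroup_cons, ht]; rfl
        have hf : pvFlag [l] = true := ht
        cases hc : pvKeepGroup cur <;>
          simp [ih [l], hk, hf, ht, hc]
      | false =>
        have hk : pvKeepGroup [l] = true := by rw [pvKeepGroup_cons, ht]; rfl
        have hf : pvFlag [l] = false := ht
        cases hc : pvKeepGroup cur <;> cases hfc : pvFlag cur <;>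
          simp [ih [l], hk, hf, ht, hh, hc, hfc]
    | false =>
      have ht : pvIsTarget l = false := by
        cases ht' : pvIsTarget l with
        | false => rfl
        | true => rw [pvTarget_header l ht'] at hh; exact hh
      rw [pvGroups_cons_body l ls cur hh, ih (cur ++ [l])]
      cases cur with
      | nil =>
        have hk : pvKeepGroup [l] = true := by rw [pvKeepGroup_cons, ht]; rfl
        have hf : pvFlag [l] = false := ht
        have h0 : pvKeepGroup ([] : List String) = true := rfl
        have h1 : pvFlag ([] : List String) = false := rfl
        simp [hk, hf, h0, h1, ht, hh]
      | cons c cs =>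
        have hkeq : pvKeepGroup ((c :: cs) ++ [l]) = pvKeepGroup (c :: cs) := rfl
        have hfeq : pvFlag ((c :: cs) ++ [l]) = pvFlag (c :: cs) := rfl
        rw [hkeq, hfeq]
        cases hf : pvFlag (c :: cs) with
        | false =>
          have hc : pvKeepGroup (c :: cs) = true := by
            rw [pvKeepGroup_cons]
            rw [show pvFlag (c :: cs) = pvIsTarget c from rfl] at hf
            rw [hf]; rfl
          simp [hc, ht, hh, hf]
        | true =>
          have hc : pvKeepGroup (c :: cs) = false := by
            rw [pvKeepGroup_cons]
            rw [show pvFlag (c :: cs) = pvIsTarget c from rfl] at hf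
            rw [hf]; rfl
          simp [hc, ht, hh, hf]

-- ===== VERDICT (by name: the statement is the Claim_ definition above) =====
theorem strip_codex_memory_palace_block_py_spec : Claim_equal_strip_codex_memory_palace_block_py := by
  intro text _
  unfold Spec_strip_codex_memory_palace_block_py
  unfold strip_codex_memory_palace_block_py strip_codex_memory_palace_block_py_alt
  have hA := pvFoldA (PySem.Str.splitlines text) [] false
  have hB := pvFoldB (PySem.Str.splitlines text) []
  rw [show pvKeepGroup [] = true from rfl, if_pos rfl,
    show pvFlag [] = false from rfl, List.nil_append] at hB
  show PySem.Str.rstrip (PySem.Str.join "\n"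
      ((PySem.Str.splitlines text).foldl pvStep ([], false)).1) = _
  rw [hA, List.nil_append]
  show _ = PySem.Str.rstrip (PySem.Str.join "\n"
      ((List.filter pvKeepGroup (pvGroups (PySem.Str.splitlines text) [])).flatten))
  rw [hB]
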